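-- pv_equiv track=rewrite | github.com/cvcenit/cs11 | mockhope1/a.py | broken_add
-- ===== SOURCE A (Python) =====
-- def broken_add(nums, w1, w2):
--     if w1 == "even" and w2 == "even":
--         return sum(i for i in nums) + (number_of_even(nums) % 2 == 1)
--     elif w1 == "even" and w2 == "odd":
--         return sum(i for i in nums) + (number_of_odd(nums) % 2 == 0)
--     elif w1 == "odd" and w2 == "even":
--         return sum(i for i in nums) + (number_of_even(nums) % 2 == 1)
--     else:
--         return sum(i for i in nums) + (number_of_odd(nums) % 2 == 0)
--
-- def number_of_odd(seq):
--     if not seq: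
--         return 0
--     else:
--         return (seq[0] % 2 == 1) + number_of_odd(seq[1:])
--
-- def number_of_even(seq):
--     if not seq:
--         return 0
--     else:
--         return (seq[0] % 2 == 0) + number_of_even(seq[1:])
-- ===== SOURCE B (Python) =====
-- def broken_add(nums, w1, w2):
--     s = 0
--     odd = 0
--     for x in nums:
--         s += x
--         odd += x % 2
--     even = len(nums) - odd
--     if w2 == "even" and w1 in ("even", "odd"):
--         return s + (even % 2 == 1)
--     return s + (odd % 2 == 0)
-- ===== Notes on version B (the rewrite author's own statement) =====
-- stated objective: faster
-- what changed: Replaced the quadratic slice-based recursion (sum generator plus recursive even/odd counters that copy the list tail at each step) by a single linear pass accumulating the sum and the odd count, deriving the even count as len - odd and the branch flag from one condition on w1/w2.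
import Mathlib
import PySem

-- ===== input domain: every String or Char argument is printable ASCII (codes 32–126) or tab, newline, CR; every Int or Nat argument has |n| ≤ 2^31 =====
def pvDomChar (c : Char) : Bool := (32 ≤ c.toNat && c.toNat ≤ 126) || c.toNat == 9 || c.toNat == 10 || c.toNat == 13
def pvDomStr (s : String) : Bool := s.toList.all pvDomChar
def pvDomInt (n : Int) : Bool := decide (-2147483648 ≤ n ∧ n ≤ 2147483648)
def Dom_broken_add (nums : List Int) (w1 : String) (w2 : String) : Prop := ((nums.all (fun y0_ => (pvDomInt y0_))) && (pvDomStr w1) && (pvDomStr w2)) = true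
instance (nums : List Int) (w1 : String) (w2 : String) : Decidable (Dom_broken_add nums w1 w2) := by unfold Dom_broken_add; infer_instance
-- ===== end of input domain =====

-- B replaces A's quadratic slice-based recursion by one linear pass over nums (objective: faster).


-- ===== PORT A =====
def number_of_odd : List Int → Int
  | [] => 0
  | x :: xs => (if PySem.Int.mod x 2 == 1 then 1 else 0) + number_of_odd xs

def number_of_even : List Int → Int
  | [] => 0
  | x :: xs => (if PySem.Int.mod x 2 == 0 then 1 else 0) + number_of_even xs

def broken_add (nums : List Int) (w1 : String) (w2 : String) : Int :=
  if w1 == "even" && w2 == "even" then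
    nums.foldl (· + ·) 0 + (if PySem.Int.mod (number_of_even nums) 2 == 1 then 1 else 0)
  else if w1 == "even" && w2 == "odd" then
    nums.foldl (· + ·) 0 + (if PySem.Int.mod (number_of_odd nums) 2 == 0 then 1 else 0)
  else if w1 == "odd" && w2 == "even" then
    nums.foldl (· + ·) 0 + (if PySem.Int.mod (number_of_even nums) 2 == 1 then 1 else 0)
  else
    nums.foldl (· + ·) 0 + (if PySem.Int.mod (number_of_odd nums) 2 == 0 then 1 else 0)

-- ===== PORT B =====
def broken_add_alt (nums : List Int) (w1 : String) (w2 : String) : Int :=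
  let p := nums.foldl (fun (p : Int × Int) x => (p.1 + x, p.2 + PySem.Int.mod x 2)) (0, 0)
  let even : Int := (nums.length : Int) - p.2
  if w2 == "even" && (w1 == "even" || w1 == "odd") then
    p.1 + (if PySem.Int.mod even 2 == 1 then 1 else 0)
  else
    p.1 + (if PySem.Int.mod p.2 2 == 0 then 1 else 0)

-- ===== PRECONDITION & SPEC =====
def Spec_broken_add (nums : List Int) (w1 : String) (w2 : String) (out : Int) : Prop := out = broken_add_alt nums w1 w2
instance (nums : List Int) (w1 : String) (w2 : String) (out : Int) : Decidable (Spec_broken_add nums w1 w2 out) := by unfold Spec_broken_add; infer_instance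

-- ===== CLAIM (what is proved, stated in full; the proofs are below) =====
def Claim_equal_broken_add : Prop := ∀ (nums : List Int) (w1 : String) (w2 : String), Dom_broken_add nums w1 w2 → Spec_broken_add nums w1 w2 (broken_add nums w1 w2)

-- ===== LEMMAS AND PROOFS =====

lemma foldl_add_shift (xs : List Int) (a : Int) :
    xs.foldl (· + ·) a = a + xs.foldl (· + ·) 0 := by
  induction xs generalizing a with
  | nil => simp
  | cons x xs ih => simp only [List.foldl_cons]; rw [ih (a + x), ih (0 + x)]; ring

lemma fold_pair_eq (nums : List Int) (s c : Int) :
    nums.foldl (fun (p : Int × Int) x => (p.1 + x, p.2 + PySem.Int.mod x 2)) (s, c)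
      = (s + nums.foldl (· + ·) 0, c + number_of_odd nums) := by
  induction nums generalizing s c with
  | nil => simp [number_of_odd]
  | cons x xs ih =>
      simp only [List.foldl_cons, number_of_odd, ih]
      rw [foldl_add_shift xs (0 + x)]
      generalize xs.foldl (· + ·) 0 = F
      generalize number_of_odd xs = N
      rcases PySem.Int.mod_two_eq x with h | h <;>
        simp only [h, Prod.mk.injEq] <;> norm_num <;> omega

lemma even_plus_odd (nums : List Int) :
    number_of_even nums + number_of_odd nums = (nums.length : Int) := by
  induction nums with
  | nil => simp [number_of_even, number_of_odd]
  | cons x xs ih =>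
      simp only [number_of_even, number_of_odd, List.length_cons]
      rcases PySem.Int.mod_two_eq x with h | h <;> simp only [h] <;> norm_num <;> omega

-- ===== VERDICT (by name: the statement is the Claim_ definition above) =====
theorem broken_add_spec : Claim_equal_broken_add := by
  intro nums w1 w2 _
  unfold Spec_broken_add broken_add broken_add_alt
  rw [fold_pair_eq nums 0 0]
  simp only [zero_add]
  have hE := even_plus_odd nums
  have hrw : (nums.length : Int) - number_of_odd nums = number_of_even nums := by omega
  rw [hrw]
  by_cases h1 : w1 = "even" <;> by_cases h2 : w2 = "even" <;> by_cases h1' : w1 = "odd" <;>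
    simp [h1, h2, h1']
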